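-- pv_equiv track=rewrite | github.com/tsunejui/farm-game | tools/generate_object_sprites.py | pixels_to_yaml_data
-- ===== SOURCE A (Python) =====
-- def pixels_to_yaml_data(pixels):
--     """Convert pixel array to (palette_dict, data_string)."""
--     chars = "ABCDEFGHIJKLMNOPQRSTUVWXYZabcdefghijklmnopqrstuvwxyz"
--     color_to_char = {}
--     char_to_hex = {}
--     char_idx = 0
--     rows = []
--     for row in pixels:
--         line = ""
--         for color in row:
--             if color is None:
--                 line += "."
--             else:
--                 if color not in color_to_char:
--                     if char_idx < len(chars):
--                         c = chars[char_idx]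
--                         color_to_char[color] = c
--                         char_to_hex[c] = color
--                         char_idx += 1
--                     else:
--                         c = "?"
--                 line += color_to_char.get(color, "?")
--         rows.append(line)
--     palette = {'.': '#00000000'}
--     palette.update(char_to_hex)
--     return palette, "\n".join(rows)
-- ===== SOURCE B (Python) =====
-- def pixels_to_yaml_data(pixels):
--     """Convert pixel array to (palette_dict, data_string)."""
--     chars = "ABCDEFGHIJKLMNOPQRSTUVWXYZabcdefghijklmnopqrstuvwxyz"
--     # pass 1: distinct non-None colors in first-seen order
--     order = []
--     seen = set()
--     for row in pixels:
--         for color in row: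
--             if color is not None and color not in seen:
--                 seen.add(color)
--                 order.append(color)
--     # the first 52 colors get a character; later colors stay unmapped
--     color_to_char = dict(zip(order, chars))
--     palette = {'.': '#00000000'}
--     palette.update(zip(chars, order))
--     # pass 2: render the grid through the finished map
--     data = "\n".join(
--         "".join("." if c is None else color_to_char.get(c, "?") for c in row)
--         for row in pixels
--     )
--     return palette, data
-- ===== Notes on version B (the rewrite author's own statement) =====
-- stated objective: alternative
-- what changed: A assigns palette characters on the fly inside a single stateful render loop (two dicts and a counter mutated per pixel); B is re-decomposed into two passes: first collect the distinct non-None colors in first-seen order, build color_to_char and the palette once from zip(order, chars), then render the whole grid through the finished map with comprehensions.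
import Mathlib
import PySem

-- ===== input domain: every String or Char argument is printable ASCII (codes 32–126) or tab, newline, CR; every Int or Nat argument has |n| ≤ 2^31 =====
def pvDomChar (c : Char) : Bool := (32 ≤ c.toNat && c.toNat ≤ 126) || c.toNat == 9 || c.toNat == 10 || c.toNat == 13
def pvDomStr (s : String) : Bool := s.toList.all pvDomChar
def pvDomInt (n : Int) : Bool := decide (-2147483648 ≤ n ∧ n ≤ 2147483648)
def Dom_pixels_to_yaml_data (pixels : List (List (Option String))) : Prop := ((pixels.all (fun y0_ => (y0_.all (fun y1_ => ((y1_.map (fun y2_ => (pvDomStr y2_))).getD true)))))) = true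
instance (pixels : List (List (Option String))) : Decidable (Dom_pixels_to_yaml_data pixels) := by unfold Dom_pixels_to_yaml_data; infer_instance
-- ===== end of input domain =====

-- B re-decomposes A's single stateful pass into two passes (collect the distinct colors first,
-- then render every pixel through the finished map); equal return value, objective: alternative.

-- ===== PORT A =====
-- chars = "ABCDEFGHIJKLMNOPQRSTUVWXYZabcdefghijklmnopqrstuvwxyz"  (len = 52)
def pvChars : List Char := "ABCDEFGHIJKLMNOPQRSTUVWXYZabcdefghijklmnopqrstuvwxyz".toList

-- body of A's inner `for color in row` loop; state = (color_to_char, char_to_hex, char_idx, line)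
def pvStepA (st : PySem.Dict String String × PySem.Dict String String × Nat × List Char)
    (color : Option String) :
    PySem.Dict String String × PySem.Dict String String × Nat × List Char :=
  match color with
  | none => (st.1, st.2.1, st.2.2.1, st.2.2.2 ++ ['.'])
  | some col =>
    if st.1.contains col then
      (st.1, st.2.1, st.2.2.1, st.2.2.2 ++ (st.1.getD col "?").toList)
    else if st.2.2.1 < 52 then
      -- c = chars[char_idx]; in range because char_idx < 52 = len(chars)
      let ch := String.mk [pvChars.getD st.2.2.1 ' ']
      let c2c' := st.1.insert col ch
      (c2c', st.2.1.insert ch col, st.2.2.1 + 1, st.2.2.2 ++ (c2c'.getD col "?").toList)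
    else
      (st.1, st.2.1, st.2.2.1, st.2.2.2 ++ (st.1.getD col "?").toList)

-- body of A's outer `for row in pixels` loop
def pvRowStep (st : PySem.Dict String String × PySem.Dict String String × Nat × List (List Char))
    (row : List (Option String)) :
    PySem.Dict String String × PySem.Dict String String × Nat × List (List Char) :=
  let r := row.foldl pvStepA (st.1, st.2.1, st.2.2.1, ([] : List Char))
  (r.1, r.2.1, r.2.2.1, st.2.2.2 ++ [r.2.2.2])

def pixels_to_yaml_data (pixels : List (List (Option String))) :
    (List (String × String)) × String :=
  let fin := pixels.foldl pvRowStep (PySem.Dict.empty, PySem.Dict.empty, 0, ([] : List (List Char)))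
  -- palette = {'.': '#00000000'}; palette.update(char_to_hex)
  let palette := PySem.Dict.update (PySem.Dict.mk [(".", "#00000000")]) (fin.2.1).items
  (palette.items, String.mk (PySem.Chars.join ['\n'] fin.2.2.2))

-- ===== PORT B =====
-- the 52 palette characters as the single-character strings Source B stores in its dicts
def pvCS : List String := pvChars.map (fun c => String.mk [c])

-- one pixel rendered through the finished color_to_char map: '.' for None, '?' if unmapped
def pvRender (c2c : PySem.Dict String String) (c : Option String) : List Char :=
  match c with
  | none => ['.']
  | some col => (c2c.getD col "?").toList

-- `if color is not None and color not in seen: seen.add(color); order.append(color)`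
def pvCollect (st : List String × PySem.Set String) (color : Option String) :
    List String × PySem.Set String :=
  match color with
  | none => st
  | some col =>
    if PySem.Set.contains st.2 col then st
    else (st.1 ++ [col], PySem.Set.add st.2 col)

def pixels_to_yaml_data_alt (pixels : List (List (Option String))) :
    (List (String × String)) × String :=
  -- pass 1: distinct non-None colors in first-seen order
  let order := (pixels.foldl (fun st row => row.foldl pvCollect st) ([], PySem.Set.empty)).1
  -- color_to_char = dict(zip(order, chars))  (zip truncates to the first 52 colors)
  let c2c := PySem.Dict.ofList (List.zip order pvCS)
  -- palette = {'.': '#00000000'}; palette.update(zip(chars, order))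
  let palette := PySem.Dict.update (PySem.Dict.mk [(".", "#00000000")]) (List.zip pvCS order)
  -- pass 2: render every row through the finished map
  let rows := pixels.map (fun row => row.flatMap (pvRender c2c))
  (palette.items, String.mk (PySem.Chars.join ['\n'] rows))

-- ===== PRECONDITION & SPEC =====
def Spec_pixels_to_yaml_data (pixels : List (List (Option String))) (out : (List (String × String)) × String) : Prop := out = pixels_to_yaml_data_alt pixels
instance (pixels : List (List (Option String))) (out : (List (String × String)) × String) : Decidable (Spec_pixels_to_yaml_data pixels out) := by unfold Spec_pixels_to_yaml_data; infer_instance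

-- ===== CLAIM (what is proved, stated in full; the proofs are below) =====
def Claim_equal_pixels_to_yaml_data : Prop := ∀ (pixels : List (List (Option String))), Dom_pixels_to_yaml_data pixels → Spec_pixels_to_yaml_data pixels (pixels_to_yaml_data pixels)

-- ===== LEMMAS AND PROOFS =====

-- rendering of one pixel through the finished map of the full first-seen color list D
def pvEmit (D : List String) : Option String → List Char :=
  pvRender (PySem.Dict.mk (List.zip D pvCS))

-- proof-side view of pass 1: the `order` list alone determines the fold (seen == set(order))
def pvAddColor (order : List String) (color : Option String) : List String :=
  match color with
  | none => order
  | some col => if col ∈ order then order else order ++ [col]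

lemma collect_eq (c : Option String) (S : List String) :
    pvCollect (S, S) c = (pvAddColor S c, pvAddColor S c) := by
  cases c with
  | none => rfl
  | some col =>
    by_cases hm : col ∈ S
    · simp [pvCollect, pvAddColor, hm, PySem.Set.contains]
    · simp [pvCollect, pvAddColor, hm, PySem.Set.add, PySem.Set.contains]

lemma foldl_collect_eq (row : List (Option String)) :
    ∀ S : List String,
      row.foldl pvCollect (S, S) = (row.foldl pvAddColor S, row.foldl pvAddColor S) := by
  induction row with
  | nil => intro S; rfl
  | cons c row ih =>
    intro S
    simp only [List.foldl_cons, collect_eq c S]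
    exact ih (pvAddColor S c)

lemma foldl2_collect_eq (pxs : List (List (Option String))) :
    ∀ S : List String,
      pxs.foldl (fun st row => row.foldl pvCollect st) (S, S)
        = (pxs.foldl (fun o row => row.foldl pvAddColor o) S,
           pxs.foldl (fun o row => row.foldl pvAddColor o) S) := by
  induction pxs with
  | nil => intro S; rfl
  | cons r pxs ih =>
    intro S
    simp only [List.foldl_cons, foldl_collect_eq r S, ih (r.foldl pvAddColor S)]

lemma pvCS_nodup : pvCS.Nodup := by decide

lemma pvCS_len : pvCS.length = 52 := by decide

-- `order` only grows by appending
lemma addColor_prefix (S : List String) (c : Option String) : S <+: pvAddColor S c := by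
  cases c with
  | none => exact List.prefix_refl S
  | some col =>
    simp only [pvAddColor]
    split
    · exact List.prefix_refl S
    · exact ⟨[col], rfl⟩

lemma addColor_nodup {S : List String} (hS : S.Nodup) (c : Option String) :
    (pvAddColor S c).Nodup := by
  cases c with
  | none => exact hS
  | some col =>
    simp only [pvAddColor]
    split
    · exact hS
    · next h =>
      refine hS.append (List.nodup_singleton col) ?_
      intro a ha hb
      simp only [List.mem_singleton] at hb
      subst hb; exact h ha

lemma foldl_addColor_prefix (row : List (Option String)) :
    ∀ S : List String, S <+: row.foldl pvAddColor S := by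
  induction row with
  | nil => intro S; exact List.prefix_refl S
  | cons c row ih =>
    intro S
    exact (addColor_prefix S c).trans (ih (pvAddColor S c))

lemma foldl_addColor_nodup (row : List (Option String)) :
    ∀ S : List String, S.Nodup → (row.foldl pvAddColor S).Nodup := by
  induction row with
  | nil => intro S h; exact h
  | cons c row ih => intro S h; exact ih _ (addColor_nodup h c)

lemma foldl2_addColor_prefix (pxs : List (List (Option String))) :
    ∀ S : List String, S <+: pxs.foldl (fun o row => row.foldl pvAddColor o) S := by
  induction pxs with
  | nil => intro S; exact List.prefix_refl S
  | cons r pxs ih =>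
    intro S
    exact (foldl_addColor_prefix r S).trans (ih _)

lemma foldl2_addColor_nodup (pxs : List (List (Option String))) :
    ∀ S : List String, S.Nodup → (pxs.foldl (fun o row => row.foldl pvAddColor o) S).Nodup := by
  induction pxs with
  | nil => intro S h; exact h
  | cons r pxs ih => intro S h; exact ih _ (foldl_addColor_nodup r S h)

-- zip facts
lemma zip_append_singleton {α β : Type} (l1 : List α) (l2 : List β) (x : α)
    (h : l1.length < l2.length) :
    (l1 ++ [x]).zip l2 = l1.zip l2 ++ [(x, l2[l1.length])] := by
  induction l1 generalizing l2 with
  | nil =>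
    cases l2 with
    | nil => simp at h
    | cons b l2 => simp
  | cons a l1 ih =>
    cases l2 with
    | nil => simp at h
    | cons b l2 =>
      simp only [List.cons_append, List.zip_cons_cons, List.length_cons]
      rw [ih l2 (by simpa using h)]
      simp

lemma zip_singleton_append_right {α β : Type} (l1 : List α) (l2 : List β) (x : β)
    (h : l2.length < l1.length) :
    l1.zip (l2 ++ [x]) = l1.zip l2 ++ [(l1[l2.length], x)] := by
  induction l2 generalizing l1 with
  | nil =>
    cases l1 with
    | nil => simp at h
    | cons a l1 => simp
  | cons b l2 ih =>
    cases l1 with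
    | nil => simp at h
    | cons a l1 =>
      simp only [List.cons_append, List.zip_cons_cons, List.length_cons]
      rw [ih l1 (by simpa using h)]
      simp

lemma zip_append_of_le {α β : Type} (l1 : List α) (l2 : List β) (t : List α)
    (h : l2.length ≤ l1.length) :
    (l1 ++ t).zip l2 = l1.zip l2 := by
  induction l1 generalizing l2 with
  | nil =>
    cases l2 with
    | nil => simp
    | cons b l2 => simp at h
  | cons a l1 ih =>
    cases l2 with
    | nil => simp
    | cons b l2 =>
      simp only [List.cons_append, List.zip_cons_cons]
      rw [ih l2 (by simpa using h)]

lemma zip_append_right_of_le {α β : Type} (l1 : List α) (l2 : List β) (t : List β)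
    (h : l1.length ≤ l2.length) :
    l1.zip (l2 ++ t) = l1.zip l2 := by
  induction l2 generalizing l1 with
  | nil =>
    cases l1 with
    | nil => simp
    | cons b l1 => simp at h
  | cons b l2 ih =>
    cases l1 with
    | nil => simp
    | cons a l1 =>
      simp only [List.cons_append, List.zip_cons_cons]
      rw [ih l1 (by simpa using h)]

lemma map_fst_zip_prefix {α β : Type} (l1 : List α) (l2 : List β) :
    (l1.zip l2).map Prod.fst <+: l1 := by
  induction l1 generalizing l2 with
  | nil => simp
  | cons a l1 ih =>
    cases l2 with
    | nil => simp
    | cons b l2 =>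
      obtain ⟨t, ht⟩ := ih l2
      exact ⟨t, by simp [ht]⟩

lemma nodup_getElem_not_mem_take {α : Type} (l : List α) (i : Nat) (h : i < l.length)
    (hnd : l.Nodup) : l[i] ∉ l.take i := by
  intro hm
  obtain ⟨j, hj, hji⟩ := List.mem_iff_getElem.mp hm
  rw [List.getElem_take] at hji
  have : j = i := (List.Nodup.getElem_inj_iff hnd).mp hji
  simp at hj
  omega

-- first-match lookup in a zipped association list depends only on the prefix containing the key
lemma find?_zip_append (S T : List String) (cs : List String) (col : String) (h : col ∈ S) :
    ((S ++ T).zip cs).find? (fun p => p.1 == col) = (S.zip cs).find? (fun p => p.1 == col) := by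
  induction S generalizing cs with
  | nil => simp at h
  | cons s S ih =>
    cases cs with
    | nil => simp
    | cons c cs =>
      simp only [List.cons_append, List.zip_cons_cons, List.find?_cons]
      split
      · rfl
      · next hne =>
        apply ih
        rcases List.mem_cons.mp h with h' | h'
        · subst h'; simp at hne
        · exact h'

lemma getD_zip_prefix (S D : List String) (cs : List String) (col : String)
    (h : col ∈ S) (hp : S <+: D) :
    (PySem.Dict.mk (D.zip cs)).getD col "?" = (PySem.Dict.mk (S.zip cs)).getD col "?" := by
  obtain ⟨T, rfl⟩ := hp
  simp only [PySem.Dict.getD, PySem.Dict.get?]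
  rw [find?_zip_append S T cs col h]

lemma contains_zip_iff (S : List String) (cs : List String) (col : String) :
    (PySem.Dict.mk (S.zip cs)).contains col = true ↔ col ∈ S.take cs.length := by
  induction S generalizing cs with
  | nil => simp [PySem.Dict.contains]
  | cons s S ih =>
    cases cs with
    | nil => simp [PySem.Dict.contains]
    | cons c cs =>
      simp only [List.zip_cons_cons, PySem.Dict.contains, List.any_cons, List.length_cons,
        List.take_succ_cons, List.mem_cons, Bool.or_eq_true, beq_iff_eq]
      constructor
      · rintro (h | h)
        · exact Or.inl h.symm
        · exact Or.inr ((ih cs).mp h)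
      · rintro (h | h)
        · exact Or.inl h.symm
        · exact Or.inr ((ih cs).mpr h)

-- one pixel of A's inner loop, on the abstract state determined by the first-seen list S
lemma stepA_eq (S D : List String) (line : List Char) (c : Option String)
    (hpre : pvAddColor S c <+: D) :
    pvStepA (PySem.Dict.mk (S.zip pvCS), PySem.Dict.mk (pvCS.zip S), min S.length 52, line) c
      = (PySem.Dict.mk ((pvAddColor S c).zip pvCS), PySem.Dict.mk (pvCS.zip (pvAddColor S c)),
          min (pvAddColor S c).length 52, line ++ pvEmit D c) := by
  cases c with
  | none => simp [pvStepA, pvAddColor, pvEmit, pvRender]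
  | some col =>
    by_cases hmem : col ∈ S
    · have hS' : pvAddColor S (some col) = S := by simp [pvAddColor, hmem]
      rw [hS'] at hpre ⊢
      have hlook : pvEmit D (some col)
          = ((PySem.Dict.mk (S.zip pvCS)).getD col "?").toList := by
        simp only [pvEmit, pvRender]
        rw [getD_zip_prefix S D pvCS col hmem hpre]
      by_cases htk : col ∈ S.take pvCS.length
      · have hc : (PySem.Dict.mk (S.zip pvCS)).contains col = true :=
          (contains_zip_iff S pvCS col).mpr htk
        simp [pvStepA, hc, hlook]
      · have hc : (PySem.Dict.mk (S.zip pvCS)).contains col = false := by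
          rw [Bool.eq_false_iff]
          intro h
          exact htk ((contains_zip_iff S pvCS col).mp h)
        have hlen : 52 < S.length := by
          by_contra hle
          rw [not_lt] at hle
          apply htk
          rw [pvCS_len, List.take_of_length_le hle]
          exact hmem
        have hmin : min S.length 52 = 52 := by omega
        simp [pvStepA, hc, hmin, hlook]
    · have hc : (PySem.Dict.mk (S.zip pvCS)).contains col = false := by
        rw [Bool.eq_false_iff]
        intro h
        exact hmem (List.take_subset _ _ ((contains_zip_iff S pvCS col).mp h))
      have hS' : pvAddColor S (some col) = S ++ [col] := by simp [pvAddColor, hmem]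
      rw [hS'] at hpre ⊢
      have hmemS' : col ∈ S ++ [col] := by simp
      have hlook : pvEmit D (some col)
          = ((PySem.Dict.mk ((S ++ [col]).zip pvCS)).getD col "?").toList := by
        simp only [pvEmit, pvRender]
        rw [getD_zip_prefix (S ++ [col]) D pvCS col hmemS' hpre]
      by_cases hlen : S.length < 52
      · have hmin : min S.length 52 = S.length := by omega
        have hlt : S.length < pvCS.length := by rw [pvCS_len]; exact hlen
        have hch : String.mk [pvChars.getD S.length ' '] = pvCS[S.length] := by
          rw [List.getD_eq_getElem _ _ (by simpa [pvCS_len] using hlen)]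
          simp only [pvCS, List.getElem_map]
          rfl
        have hz1 : (S ++ [col]).zip pvCS = S.zip pvCS ++ [(col, pvCS[S.length])] :=
          zip_append_singleton S pvCS col hlt
        have hins : (PySem.Dict.mk (S.zip pvCS)).insert col (pvCS[S.length])
            = PySem.Dict.mk ((S ++ [col]).zip pvCS) := by
          apply PySem.Dict.ext
          rw [PySem.Dict.items_insert_of_not_contains _ _ hc, hz1]
        have hc2 : (PySem.Dict.mk (pvCS.zip S)).contains (pvCS[S.length]) = false := by
          rw [Bool.eq_false_iff]
          intro h
          have hmem' := (contains_zip_iff pvCS S (pvCS[S.length])).mp h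
          exact nodup_getElem_not_mem_take pvCS S.length hlt pvCS_nodup hmem'
        have hz2 : pvCS.zip (S ++ [col]) = pvCS.zip S ++ [(pvCS[S.length], col)] :=
          zip_singleton_append_right pvCS S col hlt
        have hins2 : (PySem.Dict.mk (pvCS.zip S)).insert (pvCS[S.length]) col
            = PySem.Dict.mk (pvCS.zip (S ++ [col])) := by
          apply PySem.Dict.ext
          rw [PySem.Dict.items_insert_of_not_contains _ _ hc2, hz2]
        have hmin' : S.length + 1 = min (S ++ [col]).length 52 := by
          simp only [List.length_append, List.length_singleton]
          omega
        simp only [pvStepA, hc, Bool.false_eq_true, if_false, hmin, if_pos hlen, hch,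
          hins, hins2, hlook]
        rw [hmin']
      · have hmin : ¬ (min S.length 52 < 52) := by omega
        have h52 : pvCS.length ≤ S.length := by rw [pvCS_len]; omega
        have hz1 : (S ++ [col]).zip pvCS = S.zip pvCS := zip_append_of_le S pvCS [col] h52
        have hz2 : pvCS.zip (S ++ [col]) = pvCS.zip S := zip_append_right_of_le pvCS S [col] h52
        have hmin' : min S.length 52 = min (S ++ [col]).length 52 := by
          simp only [List.length_append, List.length_singleton]
          omega
        rw [hlook, hz1, hz2, ← hmin']
        simp [pvStepA, hc, hmin]

-- A's inner row loop
lemma rowA_eq (D : List String) (row : List (Option String)) :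
    ∀ (S : List String) (line : List Char),
      (row.foldl pvAddColor S) <+: D →
      row.foldl pvStepA (PySem.Dict.mk (S.zip pvCS), PySem.Dict.mk (pvCS.zip S), min S.length 52, line)
        = (PySem.Dict.mk ((row.foldl pvAddColor S).zip pvCS),
           PySem.Dict.mk (pvCS.zip (row.foldl pvAddColor S)),
           min (row.foldl pvAddColor S).length 52,
           line ++ row.flatMap (pvEmit D)) := by
  induction row with
  | nil => intro S line _; simp
  | cons c row ih =>
    intro S line hpre
    simp only [List.foldl_cons] at hpre ⊢
    have hpre1 : pvAddColor S c <+: D :=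
      (foldl_addColor_prefix row (pvAddColor S c)).trans hpre
    rw [stepA_eq S D line c hpre1,
      ih (pvAddColor S c) (line ++ pvEmit D c) hpre]
    simp

-- A's outer loop
lemma gridA_eq (D : List String) (pxs : List (List (Option String))) :
    ∀ (S : List String) (rows : List (List Char)),
      (pxs.foldl (fun o row => row.foldl pvAddColor o) S) <+: D →
      pxs.foldl pvRowStep
        (PySem.Dict.mk (S.zip pvCS), PySem.Dict.mk (pvCS.zip S), min S.length 52, rows)
        = (PySem.Dict.mk ((pxs.foldl (fun o row => row.foldl pvAddColor o) S).zip pvCS),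
           PySem.Dict.mk (pvCS.zip (pxs.foldl (fun o row => row.foldl pvAddColor o) S)),
           min (pxs.foldl (fun o row => row.foldl pvAddColor o) S).length 52,
           rows ++ pxs.map (fun r => r.flatMap (pvEmit D))) := by
  induction pxs with
  | nil => intro S rows _; simp
  | cons r pxs ih =>
    intro S rows hpre
    simp only [List.foldl_cons] at hpre ⊢
    have hpre1 : (r.foldl pvAddColor S) <+: D :=
      (foldl2_addColor_prefix pxs (r.foldl pvAddColor S)).trans hpre
    have hstep : pvRowStep
        (PySem.Dict.mk (S.zip pvCS), PySem.Dict.mk (pvCS.zip S), min S.length 52, rows) r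
        = (PySem.Dict.mk ((r.foldl pvAddColor S).zip pvCS),
           PySem.Dict.mk (pvCS.zip (r.foldl pvAddColor S)),
           min (r.foldl pvAddColor S).length 52,
           rows ++ [r.flatMap (pvEmit D)]) := by
      unfold pvRowStep
      dsimp only
      rw [rowA_eq D r S [] hpre1]
      simp
    rw [hstep, ih (r.foldl pvAddColor S) (rows ++ [r.flatMap (pvEmit D)]) hpre]
    simp

-- dict(zip(order, chars)) with distinct keys is the association list itself
lemma ofList_fresh (l : List (String × String)) (h : (l.map Prod.fst).Nodup) :
    PySem.Dict.ofList l = PySem.Dict.mk l := by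
  apply PySem.Dict.ext
  have := PySem.Dict.items_foldl_insert_fresh (l := l) (k := Prod.fst) (v := Prod.snd)
    (d := PySem.Dict.empty) (by intro a _; rfl) h
  simpa [PySem.Dict.ofList, PySem.Dict.update] using this

-- ===== VERDICT (by name: the statement is the Claim_ definition above) =====
theorem pixels_to_yaml_data_spec : Claim_equal_pixels_to_yaml_data := by
  intro pixels _
  unfold Spec_pixels_to_yaml_data pixels_to_yaml_data pixels_to_yaml_data_alt
  dsimp only
  have hcol := foldl2_collect_eq pixels []
  rw [show (([], []) : List String × PySem.Set String) = ([], PySem.Set.empty) from rfl] at hcol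
  rw [hcol]
  dsimp only
  set order := pixels.foldl (fun o row => row.foldl pvAddColor o) [] with horder
  have hnd : order.Nodup := foldl2_addColor_nodup pixels [] List.nodup_nil
  have hgrid := gridA_eq order pixels [] [] (by rw [← horder])
  simp only [List.zip_nil_left, List.zip_nil_right, List.length_nil, Nat.zero_min,
    List.nil_append] at hgrid
  rw [show (PySem.Dict.empty : PySem.Dict String String) = PySem.Dict.mk [] from rfl, hgrid]
  have hofl : PySem.Dict.ofList (List.zip order pvCS) = PySem.Dict.mk (List.zip order pvCS) :=
    ofList_fresh _ (((map_fst_zip_prefix order pvCS).sublist).nodup hnd)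
  rw [hofl]
  rfl
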